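-- pv_equiv track=rewrite | github.com/k-harada/AtCoder | ADT/20231025/E.py | solve
-- ===== SOURCE A (Python) =====
-- from collections import defaultdict
--
-- def solve(n, x, a_list):
--     d = defaultdict(int)
--     for a in a_list:
--         d[a + x] = 1
--     for a in a_list:
--         if d[a] == 1:
--             return "Yes"
--     return "No"
-- ===== SOURCE B (Python) =====
-- def solve(n, x, a_list):
--     srt = sorted(a_list)
--     for a in a_list:
--         t = a + x
--         lo, hi = 0, len(srt)
--         while lo < hi:  # hand-written bisect_left (A's module imports no bisect)
--             mid = (lo + hi) // 2
--             if srt[mid] < t: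
--                 lo = mid + 1
--             else:
--                 hi = mid
--         if lo < len(srt) and srt[lo] == t:
--             return "Yes"
--     return "No"
-- ===== Notes on version B (the rewrite author's own statement) =====
-- stated objective: alternative
-- what changed: Replaced A's hash-set membership (defaultdict of shifted keys) by sorting a copy of the list and doing a per-element binary search for a+x.
import Mathlib
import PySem

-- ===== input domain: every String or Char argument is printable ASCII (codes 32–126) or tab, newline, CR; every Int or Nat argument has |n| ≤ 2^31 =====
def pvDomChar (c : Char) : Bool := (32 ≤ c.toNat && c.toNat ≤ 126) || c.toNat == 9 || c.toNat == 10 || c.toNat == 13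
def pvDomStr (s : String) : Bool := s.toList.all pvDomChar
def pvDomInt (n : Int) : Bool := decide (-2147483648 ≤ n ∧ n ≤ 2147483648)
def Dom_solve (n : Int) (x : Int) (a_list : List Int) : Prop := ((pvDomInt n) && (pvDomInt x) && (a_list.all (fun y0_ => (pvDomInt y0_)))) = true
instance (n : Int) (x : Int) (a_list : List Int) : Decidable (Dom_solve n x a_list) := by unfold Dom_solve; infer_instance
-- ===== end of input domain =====

-- B replaces A's hash-membership (dict of shifted keys) by sort + per-element binary search: alternative algorithm, not claimed faster.


-- ===== PORT A =====
-- second loop of A; d is read-only for the result (defaultdict's insert-of-0 on a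
-- missing key never changes any later `d[a]` read against default 0, so it is elided)
def solveLoopA (d : PySem.Dict Int Int) : List Int → String
  | [] => "No"
  | a :: rest => if d.getD a 0 == 1 then "Yes" else solveLoopA d rest

def solve (n : Int) (x : Int) (a_list : List Int) : String :=
  let d := a_list.foldl (fun d a => d.insert (a + x) 1) PySem.Dict.empty
  solveLoopA d a_list

-- ===== PORT B =====
-- hand-written bisect_left of Source B: while lo < hi: mid = (lo+hi)//2; …
-- (srt.getD mid 0 = srt[mid]; mid is always in range since lo < hi ≤ len srt at every call)
def pvBisect (srt : List Int) (t : Int) (lo hi : Nat) : Nat :=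
  if h : lo < hi then
    let mid := (lo + hi) / 2
    if srt.getD mid 0 < t then pvBisect srt t (mid + 1) hi
    else pvBisect srt t lo mid
  else lo
termination_by hi - lo
decreasing_by all_goals omega

def solveLoopB (srt : List Int) (x : Int) : List Int → String
  | [] => "No"
  | a :: rest =>
    let t := a + x
    let lo := pvBisect srt t 0 srt.length
    if lo < srt.length && srt.getD lo 0 == t then "Yes" else solveLoopB srt x rest

def solve_alt (n : Int) (x : Int) (a_list : List Int) : String :=
  let srt := PySem.List.sorted a_list (fun v => v)
  solveLoopB srt x a_list

-- ===== PRECONDITION & SPEC =====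
def Spec_solve (n : Int) (x : Int) (a_list : List Int) (out : String) : Prop := out = solve_alt n x a_list
instance (n : Int) (x : Int) (a_list : List Int) (out : String) : Decidable (Spec_solve n x a_list out) := by unfold Spec_solve; infer_instance

-- ===== CLAIM (what is proved, stated in full; the proofs are below) =====
def Claim_equal_solve : Prop := ∀ (n : Int) (x : Int) (a_list : List Int), Dom_solve n x a_list → Spec_solve n x a_list (solve n x a_list)

-- ===== LEMMAS AND PROOFS =====

-- A side: the dict built by the first loop maps k to 1 iff k = b + x for some b in the list
theorem getD_foldl_insert_one (x : Int) (l : List Int) (d : PySem.Dict Int Int) (k : Int) :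
    (l.foldl (fun d a => d.insert (a + x) 1) d).getD k 0
      = if l.any (fun b => b + x == k) then 1 else d.getD k 0 := by
  induction l generalizing d with
  | nil => simp
  | cons a rest ih =>
    simp only [List.foldl_cons, ih, List.any_cons, PySem.Dict.getD_insert]
    rcases eq_or_ne (a + x) k with h2 | h2
    · simp [h2]
    · have h2' : k ≠ a + x := Ne.symm h2
      by_cases h1 : rest.any (fun b => b + x == k) <;> simp [h1, h2, h2']

theorem solveLoopA_eq (d : PySem.Dict Int Int) (l : List Int) :
    solveLoopA d l = if l.any (fun a => d.getD a 0 == 1) then "Yes" else "No" := by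
  induction l with
  | nil => simp [solveLoopA]
  | cons a rest ih =>
    simp only [solveLoopA, ih, List.any_cons]
    by_cases h : d.getD a 0 == 1 <;> simp [h]

theorem solve_eq (n x : Int) (l : List Int) :
    solve n x l = if l.any (fun a => l.any (fun b => b + x == a)) then "Yes" else "No" := by
  unfold solve
  rw [solveLoopA_eq]
  have hb : ∀ c : Bool, ((if c = true then (1 : Int) else 0) == 1) = c := by
    intro c; cases c <;> simp
  simp only [getD_foldl_insert_one, PySem.Dict.getD_empty, hb]

-- B side: binary-search correctness on a ≤-sorted list
theorem pvBisect_inv (srt : List Int) (t : Int)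
    (hs : srt.Pairwise (· ≤ ·)) (lo hi : Nat) (hhi : hi ≤ srt.length) (hlh : lo ≤ hi)
    (hlow : ∀ j, j < lo → j < srt.length → srt.getD j 0 < t)
    (hhigh : ∀ j, hi ≤ j → j < srt.length → t ≤ srt.getD j 0) :
    (∀ j, j < pvBisect srt t lo hi → j < srt.length → srt.getD j 0 < t) ∧
    (∀ j, pvBisect srt t lo hi ≤ j → j < srt.length → t ≤ srt.getD j 0) := by
  have hmono : ∀ i j : Nat, i ≤ j → j < srt.length → srt.getD i 0 ≤ srt.getD j 0 := by
    intro i j hij hj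
    rcases Nat.eq_or_lt_of_le hij with h | h
    · subst h; exact le_refl _
    · have hi' : i < srt.length := Nat.lt_of_lt_of_le h (Nat.le_of_lt hj)
      have := (List.pairwise_iff_getElem).mp hs i j hi' hj h
      simpa [List.getD_eq_getElem?_getD, List.getElem?_eq_getElem, hi', hj] using this
  induction lo, hi using pvBisect.induct srt t with
  | case1 lo hi h mid hlt ih =>
    rw [pvBisect, dif_pos h, if_pos (by simpa [mid] using hlt)]
    have hmid : mid < hi := by omega
    exact ih hhi (by omega)
      (fun j hj hjl => lt_of_le_of_lt (hmono j mid (by omega) (by omega)) hlt)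
      hhigh
  | case2 lo hi h mid hge ih =>
    rw [pvBisect, dif_pos h, if_neg (by simpa [mid] using hge)]
    have hmid : mid < hi := by omega
    exact ih (by omega) (by omega) hlow
      (fun j hj hjl => le_trans (not_lt.mp hge) (hmono mid j hj hjl))
  | case3 lo hi h =>
    rw [pvBisect, dif_neg h]
    exact ⟨fun j hj hjl => hlow j hj hjl, fun j hj hjl => hhigh j (by omega) hjl⟩

theorem pvBisect_found (srt : List Int) (t : Int) (hs : srt.Pairwise (· ≤ ·)) :
    ((pvBisect srt t 0 srt.length < srt.length && srt.getD (pvBisect srt t 0 srt.length) 0 == t) = true)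
      ↔ t ∈ srt := by
  obtain ⟨hlow, hhigh⟩ := pvBisect_inv srt t hs 0 srt.length (le_refl _) (Nat.zero_le _)
    (fun j hj _ => absurd hj (Nat.not_lt_zero j)) (fun j hj hjl => absurd hjl (by omega))
  set r := pvBisect srt t 0 srt.length with hr
  constructor
  · rintro h
    simp only [Bool.and_eq_true, decide_eq_true_eq, beq_iff_eq] at h
    obtain ⟨hrl, hrt⟩ := h
    have : srt.getD r 0 ∈ srt := by
      rw [List.getD_eq_getElem?_getD, List.getElem?_eq_getElem hrl]
      exact List.getElem_mem hrl
    rwa [hrt] at this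
  · intro hmem
    obtain ⟨k, hk, hkt⟩ := List.mem_iff_getElem.mp hmem
    have hkD : srt.getD k 0 = t := by
      rw [List.getD_eq_getElem?_getD, List.getElem?_eq_getElem hk]; exact hkt
    have hkr : r ≤ k := by
      by_contra hc
      exact absurd hkD (ne_of_lt (hlow k (by omega) hk))
    have hrl : r < srt.length := Nat.lt_of_le_of_lt hkr hk
    have h1 : t ≤ srt.getD r 0 := hhigh r (le_refl _) hrl
    have h2 : srt.getD r 0 ≤ srt.getD k 0 := by
      rcases Nat.eq_or_lt_of_le hkr with h | h
      · rw [h]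
      · have := (List.pairwise_iff_getElem).mp hs r k hrl hk h
        simpa [List.getD_eq_getElem?_getD, List.getElem?_eq_getElem, hrl, hk] using this
    simp only [Bool.and_eq_true, decide_eq_true_eq, beq_iff_eq]
    exact ⟨hrl, le_antisymm (hkD ▸ h2) h1⟩

theorem solveLoopB_eq (srt : List Int) (x : Int) (l : List Int) (hs : srt.Pairwise (· ≤ ·)) :
    solveLoopB srt x l = if l.any (fun a => (a + x) ∈ srt) then "Yes" else "No" := by
  induction l with
  | nil => simp [solveLoopB]
  | cons a rest ih =>
    simp only [solveLoopB, ih, List.any_cons]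
    by_cases h : (a + x) ∈ srt
    · rw [if_pos ((pvBisect_found srt (a + x) hs).mpr h)]
      simp [h]
    · rw [if_neg (by
        intro hc
        exact h ((pvBisect_found srt (a + x) hs).mp hc))]
      simp [h]

theorem solve_alt_eq (n x : Int) (l : List Int) :
    solve_alt n x l = if l.any (fun a => (a + x) ∈ l) then "Yes" else "No" := by
  unfold solve_alt
  rw [solveLoopB_eq _ _ _ (by simpa using PySem.List.sorted_pairwise l (fun v => v))]
  simp only [PySem.List.mem_sorted]

-- ===== VERDICT (by name: the statement is the Claim_ definition above) =====
theorem solve_spec : Claim_equal_solve := by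
  intro n x l _
  unfold Spec_solve
  rw [solve_eq, solve_alt_eq]
  have h : (l.any fun a => l.any fun b => b + x == a) = (l.any fun a => decide (a + x ∈ l)) := by
    rw [Bool.eq_iff_iff]
    simp only [List.any_eq_true, beq_iff_eq, decide_eq_true_eq]
    constructor
    · rintro ⟨a, ha, b, hb, hba⟩
      exact ⟨b, hb, hba ▸ ha⟩
    · rintro ⟨a, ha, hax⟩
      exact ⟨a + x, hax, a, ha, rfl⟩
  rw [h]
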